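-- pv_equiv track=rewrite | github.com/sfkan6/sdr | sdr/digit_recognition.py | get_segment_code
-- ===== SOURCE A (Python) =====
-- def get_segment_code(section, N=6, threshold=100):
--     num_in_row = 0
--     max_in_row = 0
--
--     for x in section:
--         if x >= threshold:
--             num_in_row += 1
--         else:
--             max_in_row = max(max_in_row, num_in_row)
--             num_in_row = 0
--
--     if max(max_in_row, num_in_row) > N:
--         return "1"
--     else:
--         return "0"
-- ===== SOURCE B (Python) =====
-- def get_segment_code(section, N=6, threshold=100):
--     s = ''.join('1' if x >= threshold else '0' for x in section)
--     k = N + 1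
--     if k <= 0:
--         return '1'  # every section has a run longer than a negative N
--     if k > len(s):
--         return '0'  # a run of k ones cannot fit
--     return '1' if '1' * k in s else '0'
-- ===== Notes on version B (the rewrite author's own statement) =====
-- stated objective: idiomatic
-- what changed: Replaces the running-count/running-max state machine with a bitstring encoding of the section and a single substring-membership test for N+1 consecutive '1's (with guards for degenerate N instead of a huge pattern).
import Mathlib
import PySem

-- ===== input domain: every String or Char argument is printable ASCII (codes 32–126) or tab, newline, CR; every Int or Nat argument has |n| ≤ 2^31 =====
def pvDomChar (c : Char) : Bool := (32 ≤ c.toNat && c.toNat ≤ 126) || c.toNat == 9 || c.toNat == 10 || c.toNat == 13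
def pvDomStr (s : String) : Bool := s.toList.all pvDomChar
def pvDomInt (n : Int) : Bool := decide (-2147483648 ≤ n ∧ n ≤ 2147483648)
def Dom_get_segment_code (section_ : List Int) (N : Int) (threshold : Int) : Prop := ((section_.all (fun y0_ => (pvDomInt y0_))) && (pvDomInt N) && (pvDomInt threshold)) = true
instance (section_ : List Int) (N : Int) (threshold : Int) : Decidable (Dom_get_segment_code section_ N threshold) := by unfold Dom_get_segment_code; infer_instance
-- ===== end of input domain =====

-- B replaces A's running-count/running-max state machine by a '0'/'1' bitstring of the
-- section plus a single substring test for N+1 consecutive '1's (idiomatic, not faster).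

-- ===== PORT A =====
def get_segment_code (section_ : List Int) (N : Int) (threshold : Int) : String :=
  -- state p = (num_in_row, max_in_row)
  let st := section_.foldl
    (fun (p : Int × Int) x =>
      if x ≥ threshold then (p.1 + 1, p.2) else ((0 : Int), max p.2 p.1))
    ((0 : Int), (0 : Int))
  if max st.2 st.1 > N then "1" else "0"

-- ===== PORT B =====
def get_segment_code_alt (section_ : List Int) (N : Int) (threshold : Int) : String :=
  let s : String := String.ofList (section_.map (fun x => if x ≥ threshold then '1' else '0'))
  let k := N + 1
  if k ≤ 0 then "1"
  else if k > (s.toList.length : Int) then "0"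
  else if PySem.Str.isIn (String.ofList (List.replicate k.toNat '1')) s then "1" else "0"

-- ===== PRECONDITION & SPEC =====
def Spec_get_segment_code (section_ : List Int) (N : Int) (threshold : Int) (out : String) : Prop := out = get_segment_code_alt section_ N threshold
instance (section_ : List Int) (N : Int) (threshold : Int) (out : String) : Decidable (Spec_get_segment_code section_ N threshold out) := by unfold Spec_get_segment_code; infer_instance

-- ===== CLAIM (what is proved, stated in full; the proofs are below) =====
def Claim_equal_get_segment_code : Prop := ∀ (section_ : List Int) (N : Int) (threshold : Int), Dom_get_segment_code section_ N threshold → Spec_get_segment_code section_ N threshold (get_segment_code section_ N threshold)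

-- ===== LEMMAS AND PROOFS =====

-- A's loop over the bitstring: leading-run counter `cur`, best-so-far `mx`.
def leadMax : List Char → Nat → Nat → Nat
  | [], cur, mx => max mx cur
  | c :: l, cur, mx => if c = '1' then leadMax l (cur + 1) mx else leadMax l 0 (max mx cur)

theorem repl_infix_repl (k cur : Nat) :
    List.replicate k '1' <:+: List.replicate cur '1' ↔ k ≤ cur := by
  constructor
  · intro h
    have := h.sublist.length_le
    simpa using this
  · intro h
    refine ⟨[], List.replicate (cur - k) '1', ?_⟩
    rw [List.nil_append, ← List.replicate_add]
    congr 1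
    omega

theorem prefix_repl_sep : ∀ (k cur : Nat) (c : Char), c ≠ '1' → ∀ (l : List Char),
    List.replicate k '1' <+: (List.replicate cur '1' ++ c :: l) → k ≤ cur := by
  intro k
  induction k with
  | zero => intro cur c _ l _; exact Nat.zero_le _
  | succ k ih =>
      intro cur c hc l h
      cases cur with
      | zero =>
          rw [List.replicate_zero, List.nil_append, List.replicate_succ] at h
          exact absurd (List.cons_prefix_cons.mp h).1.symm hc
      | succ cur =>
          rw [List.replicate_succ, List.replicate_succ, List.cons_append] at h
          have := ih cur c hc l (List.cons_prefix_cons.mp h).2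
          omega

theorem infix_repl_sep (c : Char) (hc : c ≠ '1') :
    ∀ (cur : Nat) (l : List Char) (k : Nat),
      List.replicate k '1' <:+: (List.replicate cur '1' ++ c :: l) ↔
        k ≤ cur ∨ List.replicate k '1' <:+: l := by
  intro cur
  induction cur with
  | zero =>
      intro l k
      simp only [List.replicate_zero, List.nil_append]
      rw [List.infix_cons_iff]
      constructor
      · rintro (h | h)
        · exact Or.inl (prefix_repl_sep k 0 c hc l (by simpa using h))
        · exact Or.inr h
      · rintro (h | h)
        · have hk : k = 0 := by omega
          subst hk
          exact Or.inl (List.nil_prefix)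
        · exact Or.inr h
  | succ cur ih =>
      intro l k
      rw [List.replicate_succ, List.cons_append, List.infix_cons_iff]
      constructor
      · rintro (h | h)
        · refine Or.inl (prefix_repl_sep k (cur + 1) c hc l ?_)
          rw [List.replicate_succ, List.cons_append]
          exact h
        · rcases (ih l k).mp h with h2 | h2
          · exact Or.inl (by omega)
          · exact Or.inr h2
      · rintro (h | h)
        · refine Or.inl ⟨List.replicate (cur + 1 - k) '1' ++ c :: l, ?_⟩
          rw [← List.append_assoc, ← List.replicate_add]
          have hk : k + (cur + 1 - k) = cur + 1 := by omega
          rw [hk, List.replicate_succ, List.cons_append]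
        · exact Or.inr ((ih l k).mpr (Or.inr h))

theorem leadMax_iff : ∀ (l : List Char), (∀ c ∈ l, c = '1' ∨ c = '0') → ∀ (cur mx k : Nat),
    k ≤ leadMax l cur mx ↔
      k ≤ mx ∨ List.replicate k '1' <:+: (List.replicate cur '1' ++ l) := by
  intro l
  induction l with
  | nil =>
      intro _ cur mx k
      simp only [leadMax, List.append_nil]
      rw [repl_infix_repl]
      omega
  | cons c l ih =>
      intro hl cur mx k
      rcases hl c (by simp) with hc | hc
      · subst hc
        have e : leadMax ('1' :: l) cur mx = leadMax l (cur + 1) mx := by simp [leadMax]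
        rw [e, ih (fun c hc => hl c (by simp [hc])) (cur + 1) mx k]
        have e2 : List.replicate cur '1' ++ '1' :: l = List.replicate (cur + 1) '1' ++ l := by
          rw [List.replicate_succ']
          simp
        rw [e2]
      · subst hc
        have e : leadMax ('0' :: l) cur mx = leadMax l 0 (max mx cur) := by simp [leadMax]
        rw [e, ih (fun c hc => hl c (by simp [hc])) 0 (max mx cur) k]
        simp only [List.replicate_zero, List.nil_append]
        rw [infix_repl_sep '0' (by decide) cur l k]
        simp only [le_max_iff, or_assoc]

theorem bridgeA (threshold : Int) : ∀ (l : List Int) (cur mx : Nat),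
    (fun r : Int × Int => max r.2 r.1)
      (l.foldl
        (fun (p : Int × Int) x =>
          if x ≥ threshold then (p.1 + 1, p.2) else ((0 : Int), max p.2 p.1))
        ((cur : Int), (mx : Int)))
      = ((leadMax (l.map (fun x => if x ≥ threshold then '1' else '0')) cur mx : Nat) : Int) := by
  intro l
  induction l with
  | nil =>
      intro cur mx
      simp only [List.foldl_nil, List.map_nil, leadMax]
      push_cast
      omega
  | cons x l ih =>
      intro cur mx
      rw [List.foldl_cons, List.map_cons]
      by_cases hx : x ≥ threshold
      · have eL : ∀ (rest : List Char) (c m : Nat),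
            leadMax ('1' :: rest) c m = leadMax rest (c + 1) m := by
          intro rest c m; simp [leadMax]
        simp only [if_pos hx, eL]
        have e : ((cur : Int) + 1) = ((cur + 1 : Nat) : Int) := by push_cast; ring
        rw [e]
        exact ih (cur + 1) mx
      · have eL : ∀ (rest : List Char) (c m : Nat),
            leadMax ('0' :: rest) c m = leadMax rest 0 (max m c) := by
          intro rest c m; simp [leadMax]
        simp only [if_neg hx, eL]
        have e : max ((mx : Int)) ((cur : Int)) = ((max mx cur : Nat) : Int) := by
          push_cast; omega
        rw [e]
        exact ih 0 (max mx cur)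

-- ===== VERDICT (by name: the statement is the Claim_ definition above) =====
theorem get_segment_code_spec : Claim_equal_get_segment_code := by
  intro section_ N threshold _
  unfold Spec_get_segment_code get_segment_code get_segment_code_alt
  have hA := bridgeA threshold section_ 0 0
  simp only [Nat.cast_zero] at hA
  set chars := section_.map (fun x => if x ≥ threshold then '1' else '0') with hchars
  set m := leadMax chars 0 0 with hm
  have hall : ∀ c ∈ chars, c = '1' ∨ c = '0' := by
    intro c hc
    rw [hchars] at hc
    rcases List.mem_map.mp hc with ⟨x, _, hx⟩
    split at hx <;> simp [← hx]
  have hiff : ((N + 1).toNat ≤ m) ↔ List.replicate (N + 1).toNat '1' <:+: chars := by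
    rw [hm, leadMax_iff chars hall 0 0 ((N + 1).toNat)]
    simp only [List.replicate_zero, List.nil_append]
    constructor
    · rintro (h | h)
      · have hz : (N + 1).toNat = 0 := by omega
        rw [hz, List.replicate_zero]
        exact List.nil_infix
      · exact h
    · exact Or.inr
  have hlen : (String.ofList chars).toList.length = chars.length := by simp
  by_cases h0 : N + 1 ≤ 0
  · rw [if_pos h0, if_pos]
    rw [hA]
    omega
  · rw [if_neg h0]
    by_cases h1 : (N + 1 : Int) > ((String.ofList chars).toList.length : Int)
    · rw [if_pos h1, if_neg]
      rw [hA]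
      intro hgt
      have h2 : (N + 1).toNat ≤ m := by omega
      have h3 := (hiff.mp h2).sublist.length_le
      rw [List.length_replicate] at h3
      rw [hlen] at h1
      omega
    · rw [if_neg h1]
      have hB : PySem.Str.isIn (String.ofList (List.replicate (N + 1).toNat '1')) (String.ofList chars) = true ↔
          List.replicate (N + 1).toNat '1' <:+: chars := by
        rw [PySem.Str.isIn_iff_infix]
        simp
      by_cases hcond : (N + 1).toNat ≤ m
      · rw [if_pos, if_pos]
        · exact (hB.mpr (hiff.mp hcond)).symm ▸ rfl
        · rw [hA]; omega
      · rw [if_neg, if_neg]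
        · intro h
          exact hcond (hiff.mpr (hB.mp h))
        · rw [hA]; omega
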